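-- pv_equiv track=rewrite | github.com/ohiliazov/explorebaduk_v1 | misc/pairing.py | make_pairing
-- ===== SOURCE A (Python) =====
-- from typing import List
--
-- def make_pair(players, pairs, skipped_pairs: List[set]) -> set:
--     paired = set.union(*pairs) if pairs else set()
--     unpaired = [p for p in players if p not in paired]
--     player, *opponents = unpaired
--
--     for opponent in reversed(opponents):
--         pair = {player, opponent}
--         if pair not in skipped_pairs:
--             return pair
--
-- def make_pairing(players, restricted_pairs):
--     pairs = []
--     skip_stack = [[]]
--     unpaired = set(players)
--     while skip_stack and len(unpaired) > 1:
--         if pair := make_pair(players, pairs, restricted_pairs + skip_stack[-1]):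
--             pairs.append(pair)
--             unpaired -= pair
--             skip_stack.append([])
--         elif pairs:
--             last_pair = pairs.pop()
--             unpaired |= last_pair
--             skip_stack.pop()
--             skip_stack[-1].append(last_pair)
--         else:
--             break
--
--     return pairs
-- ===== SOURCE B (Python) =====
-- def make_pairing(players, restricted_pairs):
--     # Recursive backtracking over the list of unpaired players instead of A's
--     # explicit skip-stack loop; same exploration order and first solution.
--     def solve(unpaired):
--         if len(set(unpaired)) <= 1:
--             return []
--         player, *opponents = unpaired
--         for opponent in reversed(opponents):
--             pair = {player, opponent}
--             if pair in restricted_pairs: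
--                 continue
--             sub = solve([x for x in unpaired if x not in pair])
--             if sub is not None:
--                 return [pair] + sub
--         return None
--
--     result = solve(list(players))
--     return result if result is not None else []
-- ===== Notes on version B (the rewrite author's own statement) =====
-- stated objective: simpler
-- what changed: B replaces A's explicit skip-stack while-loop (with per-level skip lists and pop/backtrack bookkeeping) by a short recursive backtracking helper over the list of unpaired players, propagating the first found solution through the call stack.
import Mathlib
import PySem

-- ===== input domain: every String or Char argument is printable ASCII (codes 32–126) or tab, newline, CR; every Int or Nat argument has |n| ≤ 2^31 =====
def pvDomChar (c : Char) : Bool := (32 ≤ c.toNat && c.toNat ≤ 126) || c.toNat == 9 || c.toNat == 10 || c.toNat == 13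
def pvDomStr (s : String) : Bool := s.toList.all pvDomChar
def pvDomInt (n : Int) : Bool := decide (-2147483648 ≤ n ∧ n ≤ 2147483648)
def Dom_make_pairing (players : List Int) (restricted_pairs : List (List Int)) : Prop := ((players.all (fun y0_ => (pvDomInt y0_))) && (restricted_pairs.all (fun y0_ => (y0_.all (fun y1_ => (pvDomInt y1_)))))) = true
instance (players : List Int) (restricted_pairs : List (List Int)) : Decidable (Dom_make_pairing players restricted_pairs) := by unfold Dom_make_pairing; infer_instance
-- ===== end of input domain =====

-- B simplifies A's explicit skip-stack backtracking loop into a short recursive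
-- backtracking helper with the same exploration order; return values are proved equal.

-- ===== PORT A =====
-- shared helpers: the Python set {player, opponent} and Python set equality (==)
def pvPair (p o : Int) : List Int := PySem.Set.ofList [p, o]

def pvSetEq (a b : List Int) : Bool := a.all (fun x => b.contains x) && b.all (fun x => a.contains x)

-- unpaired players, recomputed from the chosen pairs (as make_pair does)
def pvUnp (players : List Int) (pairs : List (List Int)) : List Int :=
  players.filter (fun p => !(PySem.Set.contains (PySem.Set.ofList pairs.flatten) p))

-- the 'for opponent in reversed(opponents)' loop of make_pair (cands already reversed)
def pvFindPair (player : Int) (cands : List Int) (skipped : List (List Int)) : Option (List Int) :=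
  match cands with
  | [] => none
  | o :: rest =>
    if skipped.any (fun s => pvSetEq (pvPair player o) s) then pvFindPair player rest skipped
    else some (pvPair player o)

-- Python's make_pair; 'paired' is only used for membership, so Set.ofList of the
-- concatenation is exact for set.union(*pairs). The [] case is Python's unpacking
-- ValueError, unreachable from make_pairing's loop guard.
def make_pair (players : List Int) (pairs : List (List Int)) (skipped : List (List Int)) : Option (List Int) :=
  match pvUnp players pairs with
  | [] => none
  | player :: opponents => pvFindPair player opponents.reverse skipped

-- skip_stack.pop(); skip_stack[-1].append(last_pair)
def pvPopSkips (skips : List (List (List Int))) (last : List Int) : List (List (List Int)) :=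
  (skips.dropLast).dropLast ++ [(skips.dropLast).getLast?.getD [] ++ [last]]

-- the while loop; the fuel only totalizes it (pvFuel is proved ≥ the iteration count)
def pvLoop (players : List Int) (restricted : List (List Int)) :
    Nat → List (List Int) → List (List (List Int)) → PySem.Set Int → List (List Int)
  | 0, pairs, _, _ => pairs
  | fuel + 1, pairs, skips, unpaired =>
    if !skips.isEmpty && decide (1 < PySem.Set.len unpaired) then
      match make_pair players pairs (restricted ++ skips.getLast?.getD []) with
      | some pair =>
          pvLoop players restricted fuel (pairs ++ [pair]) (skips ++ [[]])
            (PySem.Set.diff unpaired pair)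
      | none =>
          match pairs.getLast? with
          | some last =>
              pvLoop players restricted fuel pairs.dropLast (pvPopSkips skips last)
                (PySem.Set.update unpaired last)
          | none => pairs
    else pairs

def pvFuel (n : Nat) : Nat := (n * n + 2) ^ (n + 4) * (n + 2) + n + 1

def make_pairing (players : List Int) (restricted_pairs : List (List Int)) : List (List Int) :=
  pvLoop players restricted_pairs (pvFuel players.length) [] [[]] (PySem.Set.ofList players)

-- ===== PORT B =====
mutual
  -- Source B's solve(unpaired); the [] branch is unreachable (the guard catches it)
  def pvSolve (restricted : List (List Int)) (unpaired : List Int) : Option (List (List Int)) :=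
    if (PySem.Set.ofList unpaired).length ≤ 1 then some []
    else
      match unpaired with
      | [] => none
      | player :: opponents =>
          pvTry restricted (player :: opponents) player (by simp) opponents.reverse
  termination_by (unpaired.length, unpaired.length)
  decreasing_by apply Prod.Lex.right; simp

  -- Source B's 'for opponent in reversed(opponents)' loop; hp only serves termination
  def pvTry (restricted : List (List Int)) (unpaired : List Int) (player : Int)
      (hp : player ∈ unpaired) : List Int → Option (List (List Int))
    | [] => none
    | o :: rest =>
      if restricted.any (fun s => pvSetEq (pvPair player o) s) then
        pvTry restricted unpaired player hp rest
      else
        match pvSolve restricted (unpaired.filter (fun x => !(pvPair player o).contains x)) with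
        | some sub => some (pvPair player o :: sub)
        | none => pvTry restricted unpaired player hp rest
  termination_by cands => (unpaired.length, cands.length)
  decreasing_by
    · apply Prod.Lex.right; simp only [List.length_cons]; omega
    · apply Prod.Lex.left
      have hnp : ¬ ((!(pvPair player o).contains player) = true) := by
        simp [pvPair, PySem.Set.mem_ofList]
      exact List.length_filter_lt_length_iff_exists.mpr ⟨player, hp, hnp⟩
    · apply Prod.Lex.right; simp only [List.length_cons]; omega
end

def make_pairing_alt (players : List Int) (restricted_pairs : List (List Int)) : List (List Int) :=
  match pvSolve restricted_pairs players with
  | some result => result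
  | none => []

-- ===== PRECONDITION & SPEC =====
def Spec_make_pairing (players : List Int) (restricted_pairs : List (List Int)) (out : List (List Int)) : Prop := out = make_pairing_alt players restricted_pairs
instance (players : List Int) (restricted_pairs : List (List Int)) (out : List (List Int)) : Decidable (Spec_make_pairing players restricted_pairs out) := by unfold Spec_make_pairing; infer_instance

-- ===== CLAIM (what is proved, stated in full; the proofs are below) =====
def Claim_equal_make_pairing : Prop := ∀ (players : List Int) (restricted_pairs : List (List Int)), Dom_make_pairing players restricted_pairs → Spec_make_pairing players restricted_pairs (make_pairing players restricted_pairs)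

-- ===== LEMMAS AND PROOFS =====

-- === basic facts about the shared helpers ===
theorem pvSetEq_iff (a b : List Int) : pvSetEq a b = true ↔ (∀ x, x ∈ a ↔ x ∈ b) := by
  simp only [pvSetEq, Bool.and_eq_true, List.all_eq_true, List.contains_iff_mem]
  constructor
  · rintro ⟨h1, h2⟩ x; exact ⟨fun hx => h1 x hx, fun hx => h2 x hx⟩
  · intro h; exact ⟨fun x hx => (h x).mp hx, fun x hx => (h x).mpr hx⟩

theorem pvSetEq_refl (a : List Int) : pvSetEq a a = true := by
  rw [pvSetEq_iff]; intro x; rfl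

theorem pvSetEq_symm (a b : List Int) : pvSetEq a b = pvSetEq b a := by
  unfold pvSetEq; rw [Bool.and_comm]

theorem mem_pvPair (x p o : Int) : x ∈ pvPair p o ↔ x = p ∨ x = o := by
  simp [pvPair, PySem.Set.mem_ofList]

-- filtering by set-equal pairs is the same filter
theorem filter_setEq (u : List Int) {a b : List Int} (h : pvSetEq a b = true) :
    u.filter (fun x => !a.contains x) = u.filter (fun x => !b.contains x) := by
  apply List.filter_congr
  intro x _
  have := (pvSetEq_iff a b).mp h x
  by_cases hx : x ∈ a
  · simp [List.contains_eq_mem, hx, this.mp hx]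
  · have hb : x ∉ b := fun hb => hx (this.mpr hb)
    simp [List.contains_eq_mem, hx, hb]

theorem pvUnp_eq (players : List Int) (P : List (List Int)) :
    pvUnp players P = players.filter (fun p => !(P.flatten.contains p)) := by
  apply List.filter_congr
  intro x _
  simp [PySem.Set.contains_iff, PySem.Set.mem_ofList, List.contains_iff_mem]

theorem pvUnp_nil (players : List Int) : pvUnp players [] = players := by
  rw [pvUnp_eq]; simp

theorem pvUnp_append (players : List Int) (P : List (List Int)) (c : List Int) :
    pvUnp players (P ++ [c]) = (pvUnp players P).filter (fun x => !c.contains x) := by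
  rw [pvUnp_eq, pvUnp_eq, List.filter_filter]
  apply List.filter_congr
  intro x _
  simp only [List.flatten_append, List.flatten_cons, List.flatten_nil, List.append_nil,
    List.contains_iff_mem, List.mem_append]
  by_cases h1 : x ∈ P.flatten <;> by_cases h2 : x ∈ c <;> simp [h1, h2]

theorem pvUnp_subset (players : List Int) (P : List (List Int)) :
    ∀ x ∈ pvUnp players P, x ∈ players := by
  intro x hx; rw [pvUnp_eq] at hx; exact (List.mem_filter.mp hx).1

-- === the skip-parameterised try loop (bridge between the two searches) ===
def pvTryS (restricted s : List (List Int)) (unpaired : List Int) (player : Int)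
    (hp : player ∈ unpaired) : List Int → Option (List (List Int))
  | [] => none
  | o :: rest =>
    if (restricted ++ s).any (fun t => pvSetEq (pvPair player o) t) then
      pvTryS restricted s unpaired player hp rest
    else
      match pvSolve restricted (unpaired.filter (fun x => !(pvPair player o).contains x)) with
      | some sub => some (pvPair player o :: sub)
      | none => pvTryS restricted s unpaired player hp rest

theorem pvTryS_nil_skip (restricted : List (List Int)) (unpaired : List Int) (player : Int)
    (hp : player ∈ unpaired) (cands : List Int) :
    pvTryS restricted [] unpaired player hp cands = pvTry restricted unpaired player hp cands := by
  induction cands with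
  | nil => rw [pvTryS, pvTry]
  | cons o rest ih =>
    rw [pvTryS, pvTry]
    simp only [List.append_nil, ih]

-- adding an already-failed pair to the skip list does not change the outcome
theorem pvTryS_skip_insert (restricted s : List (List Int)) (unpaired : List Int) (player : Int)
    (hp : player ∈ unpaired) (c : List Int)
    (hc : pvSolve restricted (unpaired.filter (fun x => !c.contains x)) = none)
    (cands : List Int) :
    pvTryS restricted s unpaired player hp cands
      = pvTryS restricted (s ++ [c]) unpaired player hp cands := by
  induction cands with
  | nil => rw [pvTryS, pvTryS]
  | cons o rest ih =>
    rw [pvTryS, pvTryS]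
    have hany : ((restricted ++ (s ++ [c])).any (fun t => pvSetEq (pvPair player o) t))
        = (((restricted ++ s).any (fun t => pvSetEq (pvPair player o) t))
            || pvSetEq (pvPair player o) c) := by
      simp [List.any_append, Bool.or_assoc]
    by_cases h1 : ((restricted ++ s).any (fun t => pvSetEq (pvPair player o) t)) = true
    · simp only [h1, hany, Bool.true_or, if_true]
      exact ih
    · by_cases h2 : pvSetEq (pvPair player o) c = true
      · simp only [h1, hany, h2, Bool.false_or, if_true, if_false, Bool.false_eq_true]
        rw [filter_setEq unpaired h2, hc]
        exact ih
      · simp only [h1, hany, h2, Bool.false_or, if_false, Bool.false_eq_true]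
        cases pvSolve restricted (unpaired.filter (fun x => !(pvPair player o).contains x)) with
        | some sub => rfl
        | none => exact ih

theorem pvFindPair_none (restricted s : List (List Int)) (unpaired : List Int) (player : Int)
    (hp : player ∈ unpaired) (cands : List Int)
    (h : pvFindPair player cands (restricted ++ s) = none) :
    pvTryS restricted s unpaired player hp cands = none := by
  induction cands with
  | nil => rw [pvTryS]
  | cons o rest ih =>
    rw [pvFindPair] at h
    rw [pvTryS]
    by_cases h1 : ((restricted ++ s).any (fun t => pvSetEq (pvPair player o) t)) = true
    · simp only [h1, if_true]
      exact ih (by simpa [h1] using h)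
    · exfalso; simp [h1] at h

theorem pvFindPair_some_shape (player : Int) (cands : List Int) (sk : List (List Int))
    {c : List Int} (h : pvFindPair player cands sk = some c) :
    (∃ o ∈ cands, c = pvPair player o) ∧ sk.any (fun t => pvSetEq c t) = false := by
  induction cands with
  | nil => rw [pvFindPair] at h; exact absurd h (by simp)
  | cons o rest ih =>
    rw [pvFindPair] at h
    by_cases h1 : (sk.any (fun t => pvSetEq (pvPair player o) t)) = true
    · simp only [h1, if_true] at h
      obtain ⟨⟨o', ho', hc⟩, hsk⟩ := ih h
      exact ⟨⟨o', List.mem_cons_of_mem _ ho', hc⟩, hsk⟩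
    · simp only [h1, if_false, Bool.false_eq_true] at h
      cases h
      exact ⟨⟨o, List.mem_cons_self, rfl⟩, by simp only [Bool.not_eq_true] at h1; exact h1⟩

theorem pvFindPair_some (restricted s : List (List Int)) (unpaired : List Int) (player : Int)
    (hp : player ∈ unpaired) (cands : List Int) {c : List Int}
    (h : pvFindPair player cands (restricted ++ s) = some c) :
    pvTryS restricted s unpaired player hp cands
      = match pvSolve restricted (unpaired.filter (fun x => !c.contains x)) with
        | some sub => some (c :: sub)
        | none => pvTryS restricted (s ++ [c]) unpaired player hp cands := by
  induction cands with
  | nil => rw [pvFindPair] at h; exact absurd h (by simp)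
  | cons o rest ih =>
    rw [pvFindPair] at h
    by_cases h1 : ((restricted ++ s).any (fun t => pvSetEq (pvPair player o) t)) = true
    · simp only [h1, if_true] at h
      rw [pvTryS]
      simp only [h1, if_true]
      rw [ih h]
      have h1' : ((restricted ++ (s ++ [c])).any (fun t => pvSetEq (pvPair player o) t)) = true := by
        simp [List.any_append] at h1 ⊢
        rcases h1 with h1 | h1
        · exact Or.inl h1
        · exact Or.inr (Or.inl h1)
      cases hs : pvSolve restricted (unpaired.filter (fun x => !c.contains x)) with
      | some sub => rfl
      | none =>
        conv_rhs => rw [pvTryS]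
        simp only [h1', if_true]
    · simp only [h1, if_false, Bool.false_eq_true] at h
      cases h
      rw [pvTryS]
      simp only [h1, if_false, Bool.false_eq_true]
      cases hs : pvSolve restricted
          (unpaired.filter (fun x => !(pvPair player o).contains x)) with
      | some sub => rfl
      | none =>
        have h1' : ((restricted ++ (s ++ [pvPair player o])).any
            (fun t => pvSetEq (pvPair player o) t)) = true := by
          simp [List.any_append, pvSetEq_refl]
        conv_rhs => rw [pvTryS]
        simp only [h1', if_true]
        exact pvTryS_skip_insert restricted s unpaired player hp (pvPair player o) hs rest

-- === the unwind specification of A's loop (pops only, so structural in the stack) ===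
def pvUnwind (players : List Int) (restricted : List (List Int)) (pairs : List (List Int))
    (skips : List (List (List Int))) : List (List Int) :=
  if skips.isEmpty then pairs
  else if (PySem.Set.ofList (pvUnp players pairs)).length ≤ 1 then pairs
  else
    match pvUnp players pairs with
    | [] => pairs
    | player :: opponents =>
      match pvTryS restricted (skips.getLast?.getD []) (player :: opponents) player
          List.mem_cons_self opponents.reverse with
      | some tail => pairs ++ tail
      | none =>
        match pairs.getLast? with
        | none => pairs
        | some last =>
          if h2 : skips.length ≤ 1 then pairs
          else pvUnwind players restricted pairs.dropLast (pvPopSkips skips last)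
termination_by skips.length
decreasing_by
  simp only [pvPopSkips, List.length_append, List.length_dropLast, List.length_cons,
    List.length_nil]
  omega

-- === search-state invariants of A's loop ===
def pvPairOK (players : List Int) (e : List Int) : Prop :=
  e ≠ [] ∧ e.length ≤ 2 ∧ ∀ x ∈ e, x ∈ players

def pvSkipOK (players : List Int) (s : List (List Int)) : Prop :=
  List.Pairwise (fun a b => ¬ pvSetEq a b = true) s ∧ ∀ e ∈ s, pvPairOK players e

inductive pvSteps (players : List Int) : List (List Int) → Prop
  | nil : pvSteps players []
  | snoc {P c} : pvSteps players P → (∀ x ∈ c, x ∈ pvUnp players P) → c ≠ [] →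
      c.length ≤ 2 → pvSteps players (P ++ [c])

def pvInv (players : List Int) (P : List (List Int)) (S : List (List (List Int))) : Prop :=
  S.length = P.length + 1 ∧ pvSteps players P ∧ (∀ s ∈ S, pvSkipOK players s) ∧
  ∀ i (hi : i < P.length) (hi' : i < S.length),
    ¬ ((S[i]).any (fun t => pvSetEq (P[i]'(by omega)) t)) = true

-- === termination potential of the skip stack ===
def pvMu (B : Nat) : Nat → List (List (List Int)) → Nat
  | _, [] => 0
  | e, s :: rest => s.length * B ^ e + pvMu B (e - 1) rest

def pvB (n : Nat) : Nat := n * n + 2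
def pvW (n : Nat) : Nat := (pvB n) ^ (n + 4)

theorem pvMu_append (B e : Nat) (S : List (List (List Int))) (t : List (List Int)) :
    pvMu B e (S ++ [t]) = pvMu B e S + t.length * B ^ (e - S.length) := by
  induction S generalizing e with
  | nil => simp [pvMu]
  | cons s rest ih =>
    simp only [List.cons_append, pvMu, ih, List.length_cons]
    have : e - 1 - rest.length = e - (rest.length + 1) := by omega
    rw [this]; ring

theorem pvMu_le (B e C : Nat) (S : List (List (List Int))) (hB : 1 ≤ B)
    (hC : ∀ s ∈ S, s.length ≤ C) : pvMu B e S ≤ C * S.length * B ^ e := by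
  induction S generalizing e with
  | nil => simp [pvMu]
  | cons s rest ih =>
    simp only [pvMu, List.length_cons]
    have h1 : s.length * B ^ e ≤ C * B ^ e :=
      Nat.mul_le_mul_right _ (hC s List.mem_cons_self)
    have h2 : pvMu B (e - 1) rest ≤ C * rest.length * B ^ (e - 1) :=
      ih (e - 1) (fun x hx => hC x (List.mem_cons_of_mem _ hx))
    have h3 : B ^ (e - 1) ≤ B ^ e := Nat.pow_le_pow_right hB (by omega)
    calc s.length * B ^ e + pvMu B (e - 1) rest
        ≤ C * B ^ e + C * rest.length * B ^ (e - 1) := Nat.add_le_add h1 h2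
      _ ≤ C * B ^ e + C * rest.length * B ^ e :=
          Nat.add_le_add_left (Nat.mul_le_mul_left _ h3) _
      _ = C * (rest.length + 1) * B ^ e := by ring

-- a set of one or two ints is determined by (min, max); injects skip entries into pairs
def pvKey (e : List Int) : Int × Int :=
  match e with
  | [a] => (min a a, max a a)
  | [a, b] => (min a b, max a b)
  | _ => (0, 0)

theorem pvPairOK_shape {players : List Int} {e : List Int} (he : pvPairOK players e) :
    (∃ a, e = [a]) ∨ ∃ a b, e = [a, b] := by
  obtain ⟨h1, h2, _⟩ := he
  match e with
  | [] => exact absurd rfl h1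
  | [a] => exact Or.inl ⟨a, rfl⟩
  | [a, b] => exact Or.inr ⟨a, b, rfl⟩
  | a :: b :: c :: r => simp at h2

theorem pvKey_eq {players : List Int} {e f : List Int} (he : pvPairOK players e)
    (hf : pvPairOK players f) (h : pvKey e = pvKey f) : pvSetEq e f = true := by
  have hset : ∀ x, x ∈ e ↔ x ∈ f := by
    have key_mem : ∀ (g : List Int), pvPairOK players g →
        ∀ x, x ∈ g ↔ (x = (pvKey g).1 ∨ x = (pvKey g).2) := by
      intro g hg x
      rcases pvPairOK_shape hg with ⟨a, rfl⟩ | ⟨a, b, rfl⟩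
      · simp only [pvKey, min_self, max_self, List.mem_singleton]
        omega
      · simp only [pvKey, List.mem_cons, List.not_mem_nil, or_false]
        rcases le_total a b with hab | hab <;> simp [min_def, max_def, hab] <;> omega
    intro x
    rw [key_mem e he x, key_mem f hf x, h]
  exact (pvSetEq_iff e f).mpr hset
theorem pvKey_mem {players : List Int} {e : List Int} (he : pvPairOK players e) :
    (pvKey e).1 ∈ players ∧ (pvKey e).2 ∈ players := by
  have hmem := he.2.2
  rcases pvPairOK_shape he with ⟨a, rfl⟩ | ⟨a, b, rfl⟩
  · simp only [pvKey, min_self, max_self]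
    exact ⟨hmem a (by simp), hmem a (by simp)⟩
  · have ha : a ∈ players := hmem a (by simp)
    have hb : b ∈ players := hmem b (by simp)
    simp only [pvKey]
    rcases le_total a b with hab | hab <;> simp [min_def, max_def, hab, ha, hb]

theorem pvSkip_len_le (players : List Int) (s : List (List Int)) (h : pvSkipOK players s) :
    s.length ≤ players.length * players.length := by
  obtain ⟨hpw, hok⟩ := h
  have hnd : (s.map pvKey).Nodup := by
    apply List.pairwise_map.mpr
    apply List.Pairwise.imp_of_mem ?_ hpw
    intro a b ha hb hne
    exact fun hk => hne (pvKey_eq (hok a ha) (hok b hb) hk)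
  have hsub : ∀ k ∈ s.map pvKey, k ∈ players ×ˢ players := by
    intro k hk
    obtain ⟨e, he, rfl⟩ := List.mem_map.mp hk
    have := pvKey_mem (hok e he)
    exact List.mem_product.mpr ⟨this.1, this.2⟩
  have hlen : (s.map pvKey).length ≤ (players ×ˢ players).length := by
    calc (s.map pvKey).length = (s.map pvKey).toFinset.card :=
          (List.toFinset_card_of_nodup hnd).symm
      _ ≤ (players ×ˢ players).toFinset.card := by
          apply Finset.card_le_card
          intro k hk
          rw [List.mem_toFinset] at hk ⊢
          exact hsub k hk
      _ ≤ (players ×ˢ players).length := List.toFinset_card_le _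
  rw [List.length_product] at hlen
  simpa using hlen

theorem pvSteps_len (players : List Int) (P : List (List Int)) (h : pvSteps players P) :
    P.length + (pvUnp players P).length ≤ players.length := by
  induction h with
  | nil => rw [pvUnp_nil]; simp
  | @snoc P c hP hmem hne hlen2 ih =>
    rw [pvUnp_append]
    obtain ⟨x, hx⟩ := List.exists_mem_of_ne_nil c hne
    have hxu : x ∈ pvUnp players P := hmem x hx
    have hlt : ((pvUnp players P).filter (fun y => !c.contains y)).length
        < (pvUnp players P).length := by
      apply List.length_filter_lt_length_iff_exists.mpr
      exact ⟨x, hxu, by simp [List.contains_eq_mem, hx]⟩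
    simp only [List.length_append, List.length_cons, List.length_nil]
    omega

theorem pvSteps_dropLast (players : List Int) (P : List (List Int)) (h : pvSteps players P) :
    pvSteps players P.dropLast := by
  cases h with
  | nil => exact pvSteps.nil
  | snoc hP hmem hne hlen2 => rw [List.dropLast_concat]; exact hP

theorem pvSteps_last_mem (players : List Int) (Q : List (List Int)) (c : List Int)
    (h : pvSteps players (Q ++ [c])) :
    (∀ x ∈ c, x ∈ pvUnp players Q) ∧ pvPairOK players c := by
  generalize hR : Q ++ [c] = R at h
  cases h with
  | nil => exact absurd hR (by simp)
  | @snoc P c' hP hmem hne hlen2 =>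
    obtain ⟨h1, h2⟩ : P = Q ∧ c' = c := by
      have := List.append_inj' hR rfl
      exact ⟨this.1.symm, by have h2 := this.2; simpa using h2.symm⟩
    subst h1; subst h2
    exact ⟨hmem, hne, hlen2, fun x hx => pvUnp_subset _ _ x (hmem x hx)⟩

theorem nodup_same_mem_length {u v : List Int} (hu : u.Nodup) (hv : v.Nodup)
    (h : ∀ x, x ∈ u ↔ x ∈ v) : u.length = v.length := by
  exact ((List.perm_ext_iff_of_nodup hu hv).mpr h).length_eq

-- the Set maintained by the loop has the length of set(unpaired players)
theorem set_len_eq (u : PySem.Set Int) (v : List Int) (hu : u.Nodup)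
    (h : ∀ x, x ∈ u ↔ x ∈ v) : u.length = (PySem.Set.ofList v).length := by
  exact nodup_same_mem_length hu (PySem.Set.nodup_ofList v)
    (fun x => (h x).trans (PySem.Set.mem_ofList (xs := v) (y := x)).symm)

theorem pvUnwind_le1 (players : List Int) (restricted : List (List Int))
    (P : List (List Int)) (S : List (List (List Int)))
    (h : (PySem.Set.ofList (pvUnp players P)).length ≤ 1) :
    pvUnwind players restricted P S = P := by
  rw [pvUnwind]
  split_ifs <;> first | rfl | omega

theorem pvUnwind_cons (players : List Int) (restricted : List (List Int))
    (P : List (List Int)) (S : List (List (List Int))) (player : Int) (opps : List Int)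
    (hSne : S.isEmpty = false)
    (hU : pvUnp players P = player :: opps)
    (hg : ¬ (PySem.Set.ofList (player :: opps)).length ≤ 1) :
    pvUnwind players restricted P S =
      match pvTryS restricted (S.getLast?.getD []) (player :: opps) player
          List.mem_cons_self opps.reverse with
      | some tail => P ++ tail
      | none =>
        match P.getLast? with
        | none => P
        | some last =>
          if _ : S.length ≤ 1 then P
          else pvUnwind players restricted P.dropLast (pvPopSkips S last) := by
  rw [pvUnwind, hU]
  simp only [hSne, Bool.false_eq_true, if_false, hg]

theorem pvUnwind_top_congr (players : List Int) (restricted : List (List Int))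
    (P : List (List Int)) (T : List (List (List Int))) (t1 t2 : List (List Int))
    (ht : ∀ (player : Int) (opps : List Int), pvUnp players P = player :: opps →
        pvTryS restricted t1 (player :: opps) player List.mem_cons_self opps.reverse
          = pvTryS restricted t2 (player :: opps) player List.mem_cons_self opps.reverse) :
    pvUnwind players restricted P (T ++ [t1]) = pvUnwind players restricted P (T ++ [t2]) := by
  by_cases hg : (PySem.Set.ofList (pvUnp players P)).length ≤ 1
  · rw [pvUnwind_le1 _ _ _ _ hg, pvUnwind_le1 _ _ _ _ hg]
  · cases hU : pvUnp players P with
    | nil => exfalso; rw [hU] at hg; simp [PySem.Set.ofList] at hg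
    | cons player opps =>
      rw [hU] at hg
      have h1 : (T ++ [t1]).isEmpty = false := by simp
      have h2 : (T ++ [t2]).isEmpty = false := by simp
      rw [pvUnwind_cons players restricted P _ player opps h1 hU hg,
        pvUnwind_cons players restricted P _ player opps h2 hU hg]
      rw [List.getLast?_concat, List.getLast?_concat]
      simp only [Option.getD_some]
      rw [ht player opps hU]
      cases pvTryS restricted t2 (player :: opps) player List.mem_cons_self opps.reverse with
      | some tail => rfl
      | none =>
        cases P.getLast? with
        | none => rfl
        | some last =>
          dsimp only
          have hlen : (T ++ [t1]).length = (T ++ [t2]).length := by simp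
          have hpp : pvPopSkips (T ++ [t1]) last = pvPopSkips (T ++ [t2]) last := by
            simp [pvPopSkips, List.dropLast_concat]
          rw [hlen, hpp]

-- invariant preservation: push
theorem pvInv_push (players : List Int) (restricted : List (List Int))
    (P : List (List Int)) (S : List (List (List Int))) (player : Int) (opps : List Int)
    (c : List Int) (o : Int)
    (hInv : pvInv players P S) (hU : pvUnp players P = player :: opps)
    (ho : o ∈ opps) (hc : c = pvPair player o)
    (hnosk : ((restricted ++ S.getLast?.getD []).any (fun t => pvSetEq c t)) = false) :
    pvInv players (P ++ [c]) (S ++ [[]]) := by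
  obtain ⟨hSlen, hsteps, hskips, hiv⟩ := hInv
  have hSne : S ≠ [] := by intro hh; rw [hh] at hSlen; simp at hSlen
  rcases List.eq_nil_or_concat S with rfl | ⟨T, stop, hS⟩
  · exact absurd rfl hSne
  rw [List.concat_eq_append] at hS; subst hS
  have hTlen : T.length = P.length := by
    simp only [List.length_append, List.length_cons, List.length_nil] at hSlen; omega
  have htop : (T ++ [stop]).getLast?.getD [] = stop := by simp
  rw [htop] at hnosk
  have hnos2 : (stop.any (fun t => pvSetEq c t)) = false := by
    simp only [List.any_append, Bool.or_eq_false_iff] at hnosk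
    exact hnosk.2
  have hcmem : ∀ x ∈ c, x ∈ pvUnp players P := by
    intro x hx; rw [hc, mem_pvPair] at hx; rw [hU]
    rcases hx with rfl | rfl
    · exact List.mem_cons_self
    · exact List.mem_cons_of_mem _ ho
  have hcp : player ∈ c := by rw [hc, mem_pvPair]; left; rfl
  have hcne : c ≠ [] := by intro hnil; rw [hnil] at hcp; simp at hcp
  have hclen : c.length ≤ 2 := by
    rw [hc]
    have := PySem.Set.length_ofList_le (α := Int) [player, o]
    simpa using this
  refine ⟨?_, pvSteps.snoc hsteps hcmem hcne hclen, ?_, ?_⟩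
  · simp only [List.length_append, List.length_cons, List.length_nil] at hSlen ⊢
    omega
  · intro t ht
    rcases List.mem_append.mp ht with ht | ht
    · exact hskips t ht
    · have : t = [] := by simpa using ht
      subst this; exact ⟨List.Pairwise.nil, by simp⟩
  · intro i hi hi'
    simp only [List.length_append, List.length_cons, List.length_nil] at hi
    have hgen : ∀ (j : Nat) (hj : j < (T ++ [stop]).length), j = T.length →
        (T ++ [stop])[j]'hj = stop := by
      intro j hj hje; subst hje; exact List.getElem_concat_length rfl _
    by_cases hip : i < P.length
    · have e1 : ((T ++ [stop]) ++ [[]])[i]'(hi') = (T ++ [stop])[i]'(by simp; omega) :=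
        List.getElem_append_left (by simp; omega)
      have e2 : (P ++ [c])[i]'(by simp; omega) = P[i]'hip := List.getElem_append_left hip
      rw [e1, e2]
      exact hiv i hip (by simp; omega)
    · have hieq : i = P.length := by omega
      subst hieq
      have e2 : (P ++ [c])[P.length]'(by simp) = c := List.getElem_concat_length rfl _
      have h1 : P.length < (T ++ [stop]).length := by simp; omega
      have e1 : ((T ++ [stop]) ++ [[]])[P.length]'(hi') = (T ++ [stop])[P.length]'h1 :=
        List.getElem_append_left h1
      rw [e1, e2, hgen P.length h1 hTlen.symm]
      simp [hnos2]

-- invariant preservation: pop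
theorem pvInv_pop (players : List Int) (Q : List (List Int)) (last : List Int)
    (S : List (List (List Int))) (hInv : pvInv players (Q ++ [last]) S) :
    pvInv players Q (pvPopSkips S last) := by
  obtain ⟨hSlen, hsteps, hskips, hiv⟩ := hInv
  rcases List.eq_nil_or_concat S with rfl | ⟨T, stop, hS⟩
  · simp at hSlen
  rw [List.concat_eq_append] at hS; subst hS
  rcases List.eq_nil_or_concat T with rfl | ⟨T', sp, hT⟩
  · simp at hSlen
  rw [List.concat_eq_append] at hT; subst hT
  have hT'len : T'.length = Q.length := by
    simp only [List.length_append, List.length_cons, List.length_nil] at hSlen; omega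
  have hpop : pvPopSkips ((T' ++ [sp]) ++ [stop]) last = T' ++ [sp ++ [last]] := by
    simp [pvPopSkips]
  rw [hpop]
  have hQsteps : pvSteps players Q := by
    have := pvSteps_dropLast players (Q ++ [last]) hsteps
    rwa [List.dropLast_concat] at this
  have hgen : ∀ (j : Nat) (hj : j < (T' ++ [sp]).length), j = T'.length →
      (T' ++ [sp])[j]'hj = sp := by
    intro j hj hje; subst hje; exact List.getElem_concat_length rfl _
  have hgenQ : ∀ (j : Nat) (hj : j < (Q ++ [last]).length), j = Q.length →
      (Q ++ [last])[j]'hj = last := by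
    intro j hj hje; subst hje; exact List.getElem_concat_length rfl _
  have hsp0 : sp.any (fun t => pvSetEq last t) = false := by
    have h1 : Q.length < (Q ++ [last]).length := by simp
    have h2 : Q.length < ((T' ++ [sp]) ++ [stop]).length := by simp; omega
    have h3 : Q.length < (T' ++ [sp]).length := by simp; omega
    have := hiv Q.length h1 h2
    have e1 : ((T' ++ [sp]) ++ [stop])[Q.length]'h2 = (T' ++ [sp])[Q.length]'h3 :=
      List.getElem_append_left h3
    rw [e1, hgen Q.length h3 hT'len.symm, hgenQ Q.length h1 rfl] at this
    simpa using this
  have hspmem : ∀ e ∈ sp, pvSetEq last e = false := by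
    intro e he
    have := List.any_eq_false.mp hsp0
    simpa using this e he
  refine ⟨?_, hQsteps, ?_, ?_⟩
  · simp only [List.length_append, List.length_cons, List.length_nil]
    omega
  · intro t ht
    rcases List.mem_append.mp ht with ht | ht
    · exact hskips t (List.mem_append_left _ (List.mem_append_left _ ht))
    · have : t = sp ++ [last] := by simpa using ht
      subst this
      obtain ⟨hsp1, hsp2⟩ := hskips sp (by simp)
      have hlOK : pvPairOK players last := (pvSteps_last_mem players Q last hsteps).2
      refine ⟨?_, ?_⟩
      · apply List.pairwise_append.mpr
        refine ⟨hsp1, by simp, ?_⟩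
        intro a ha b hb
        have : b = last := by simpa using hb
        subst this
        rw [pvSetEq_symm]
        simp [hspmem a ha]
      · intro e he
        rcases List.mem_append.mp he with he | he
        · exact hsp2 e he
        · have : e = last := by simpa using he
          subst this; exact hlOK
  · intro i hi hi'
    have hi2 : i < T'.length := by omega
    have hi3 : i < (T' ++ [sp]).length := by simp; omega
    have hi4 : i < ((T' ++ [sp]) ++ [stop]).length := by simp; omega
    have hi5 : i < (Q ++ [last]).length := by simp; omega
    have e1 : (T' ++ [sp ++ [last]])[i]'hi' = T'[i]'hi2 := List.getElem_append_left hi2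
    have e2 : Q[i]'hi = (Q ++ [last])[i]'hi5 := (List.getElem_append_left hi).symm
    rw [e1, e2]
    have := hiv i hi5 hi4
    have e3 : ((T' ++ [sp]) ++ [stop])[i]'hi4 = (T' ++ [sp])[i]'hi3 :=
      List.getElem_append_left hi3
    have e4 : (T' ++ [sp])[i]'hi3 = T'[i]'hi2 := List.getElem_append_left hi2
    rw [e3, e4] at this
    exact this

-- the potential of any invariant stack is below pvW
theorem pvMu_lt_W (players : List Int) (S : List (List (List Int)))
    (hS : ∀ s ∈ S, pvSkipOK players s) (hlen : S.length ≤ players.length + 1) :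
    pvMu (pvB players.length) (players.length + 2) S < pvW players.length := by
  set n := players.length with hn
  have hB : 1 ≤ pvB n := by simp [pvB]
  have h1 := pvMu_le (pvB n) (n + 2) (n * n) S hB
    (fun s hs => pvSkip_len_le players s (hS s hs))
  have h2 : n * n * S.length * (pvB n) ^ (n + 2)
      ≤ n * n * (n + 1) * (pvB n) ^ (n + 2) :=
    Nat.mul_le_mul_right _ (Nat.mul_le_mul_left _ hlen)
  have h4 : n * n * (n + 1) < pvB n * pvB n := by
    simp only [pvB]; nlinarith
  have hXpos : 0 < (pvB n) ^ (n + 2) := Nat.pow_pos (by simp [pvB])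
  have h5 : pvW n = pvB n * pvB n * (pvB n) ^ (n + 2) := by
    have he : n + 4 = 2 + (n + 2) := by omega
    simp only [pvW, he, pow_add, pow_two]
  calc pvMu (pvB n) (n + 2) S ≤ n * n * S.length * (pvB n) ^ (n + 2) := h1
    _ ≤ n * n * (n + 1) * (pvB n) ^ (n + 2) := h2
    _ < pvB n * pvB n * (pvB n) ^ (n + 2) := (Nat.mul_lt_mul_right hXpos).mpr h4
    _ = pvW n := h5.symm

-- the potential strictly grows on a pop
theorem pvMu_pop (players : List Int) (Q : List (List Int)) (last : List Int)
    (S : List (List (List Int))) (hInv : pvInv players (Q ++ [last]) S)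
    (hQn : Q.length + 1 ≤ players.length) :
    pvMu (pvB players.length) (players.length + 2) S
      < pvMu (pvB players.length) (players.length + 2) (pvPopSkips S last) := by
  obtain ⟨hSlen, hsteps, hskips, hiv⟩ := hInv
  set n := players.length with hn
  rcases List.eq_nil_or_concat S with rfl | ⟨T, stop, hS⟩
  · simp at hSlen
  rw [List.concat_eq_append] at hS
  subst hS
  rcases List.eq_nil_or_concat T with rfl | ⟨T', sp, hT⟩
  · simp at hSlen
  rw [List.concat_eq_append] at hT
  subst hT
  have hTlen : T'.length = Q.length := by
    simp only [List.length_append, List.length_cons, List.length_nil] at hSlen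
    omega
  have hpop : pvPopSkips ((T' ++ [sp]) ++ [stop]) last = T' ++ [sp ++ [last]] := by
    simp [pvPopSkips, List.dropLast_concat, List.getLast?_concat]
  rw [hpop]
  have hk1 : n + 2 - T'.length = (n + 2 - T'.length - 1) + 1 := by omega
  set k := n + 2 - T'.length - 1 with hkdef
  have hmu1 : pvMu (pvB n) (n + 2) ((T' ++ [sp]) ++ [stop])
      = pvMu (pvB n) (n + 2) T' + sp.length * (pvB n) ^ (k + 1)
        + stop.length * (pvB n) ^ k := by
    rw [pvMu_append, pvMu_append]
    have e1 : n + 2 - T'.length = k + 1 := hk1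
    have e2 : n + 2 - (T' ++ [sp]).length = k := by
      simp only [List.length_append, List.length_cons, List.length_nil]; omega
    rw [e1, e2]
  have hmu2 : pvMu (pvB n) (n + 2) (T' ++ [sp ++ [last]])
      = pvMu (pvB n) (n + 2) T' + (sp.length + 1) * (pvB n) ^ (k + 1) := by
    rw [pvMu_append, hk1]
    simp [List.length_append]
  have hstoplen : stop.length ≤ n * n :=
    pvSkip_len_le players stop (hskips stop (by simp))
  have hBk : stop.length * (pvB n) ^ k < (pvB n) ^ (k + 1) := by
    have hlt : stop.length < pvB n := by simp only [pvB]; omega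
    calc stop.length * (pvB n) ^ k < pvB n * (pvB n) ^ k :=
          (Nat.mul_lt_mul_right (Nat.pow_pos (by simp [pvB]))).mpr hlt
      _ = (pvB n) ^ (k + 1) := by rw [pow_succ]; ring
  have hsplit : (sp.length + 1) * (pvB n) ^ (k + 1)
      = sp.length * (pvB n) ^ (k + 1) + (pvB n) ^ (k + 1) := by ring
  omega

-- === main simulation lemma: the fueled loop computes the unwind of its state ===
theorem pvMain (players : List Int) (restricted : List (List Int)) :
    ∀ (fuel : Nat) (P : List (List Int)) (S : List (List (List Int))) (u : PySem.Set Int),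
    pvInv players P S →
    u.Nodup → (∀ x : Int, x ∈ u ↔ x ∈ pvUnp players P) →
    (pvW players.length - pvMu (pvB players.length) (players.length + 2) S)
        * (players.length + 2) + (pvUnp players P).length + 1 ≤ fuel →
    pvLoop players restricted fuel P S u = pvUnwind players restricted P S := by
  intro fuel
  induction fuel with
  | zero => intro P S u _ _ _ hfuel; exact absurd hfuel (by omega)
  | succ f ih =>
    intro P S u hInv hnd hmem hfuel
    obtain ⟨hSlen, hsteps, hskips, hiv⟩ := hInv
    have hSne : S ≠ [] := by intro h; rw [h] at hSlen; simp at hSlen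
    have hSempty : S.isEmpty = false := by simpa [List.isEmpty_iff] using hSne
    have hulen : u.length = (PySem.Set.ofList (pvUnp players P)).length :=
      set_len_eq u (pvUnp players P) hnd hmem
    rw [pvLoop]
    by_cases hg : 1 < u.length
    · -- the loop guard holds
      have hgb : (!S.isEmpty && decide (1 < PySem.Set.len u)) = true := by
        have : (1 : Int) < (u.length : Int) := by exact_mod_cast hg
        simp [hSempty, PySem.Set.len, this]
      rw [hgb, if_pos rfl]
      have hg' : ¬ (PySem.Set.ofList (pvUnp players P)).length ≤ 1 := by omega
      cases hU : pvUnp players P with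
      | nil => exfalso; rw [hU] at hg'; simp [PySem.Set.ofList] at hg'
      | cons player opps =>
        have hg'' : ¬ (PySem.Set.ofList (player :: opps)).length ≤ 1 := by rw [← hU]; exact hg'
        have hmp : make_pair players P (restricted ++ S.getLast?.getD [])
            = pvFindPair player opps.reverse (restricted ++ S.getLast?.getD []) := by
          rw [make_pair, hU]
        rw [hmp]
        cases hfp : pvFindPair player opps.reverse (restricted ++ S.getLast?.getD []) with
        | some c =>
          -- push
          dsimp only
          obtain ⟨⟨o, ho, hco⟩, hnosk⟩ := pvFindPair_some_shape player opps.reverse _ hfp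
          have hcmem : ∀ x ∈ c, x ∈ pvUnp players P := by
            intro x hx
            rw [hco, mem_pvPair] at hx
            rw [hU]
            rcases hx with rfl | rfl
            · exact List.mem_cons_self
            · exact List.mem_cons_of_mem _ (List.mem_reverse.mp ho)
          have hInv' : pvInv players (P ++ [c]) (S ++ [[]]) :=
            pvInv_push players restricted P S player opps c o
              ⟨hSlen, hsteps, hskips, hiv⟩ hU (List.mem_reverse.mp ho) hco hnosk
          have hUP' : pvUnp players (P ++ [c])
              = (player :: opps).filter (fun x => !c.contains x) := by
            rw [pvUnp_append, hU]
          have hplt : (pvUnp players (P ++ [c])).length < (pvUnp players P).length := by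
            rw [pvUnp_append]
            apply List.length_filter_lt_length_iff_exists.mpr
            refine ⟨player, by rw [hU]; exact List.mem_cons_self, ?_⟩
            have : player ∈ c := by rw [hco, mem_pvPair]; left; rfl
            simp [List.contains_eq_mem, this]
          have hmu' : pvMu (pvB players.length) (players.length + 2) (S ++ [[]])
              = pvMu (pvB players.length) (players.length + 2) S := by
            rw [pvMu_append]; simp
          have hih := ih (P ++ [c]) (S ++ [[]]) (PySem.Set.diff u c) hInv'
            (PySem.Set.nodup_diff u c hnd)
            (by
              intro x
              rw [PySem.Set.mem_diff u c x, hUP', List.mem_filter]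
              constructor
              · rintro ⟨h1, h2⟩
                exact ⟨by rw [← hU]; exact (hmem x).mp h1, by simp [List.contains_eq_mem, h2]⟩
              · rintro ⟨h1, h2⟩
                refine ⟨(hmem x).mpr (by rw [hU]; exact h1), ?_⟩
                simpa [List.contains_eq_mem] using h2)
            (by rw [hmu']; omega)
          rw [hih]
          -- bridge: pvUnwind of the pushed state equals pvUnwind of the old state
          cases hsolve : pvSolve restricted (pvUnp players (P ++ [c])) with
          | some tail =>
            rw [pvUnwind_cons players restricted P S player opps hSempty hU hg'']
            rw [pvFindPair_some restricted (S.getLast?.getD []) (player :: opps) player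
              List.mem_cons_self opps.reverse hfp]
            rw [← hUP', hsolve]
            dsimp only
            by_cases hb : (PySem.Set.ofList (pvUnp players (P ++ [c]))).length ≤ 1
            · rw [pvUnwind_le1 _ _ _ _ hb]
              rw [pvSolve.eq_def] at hsolve
              rw [if_pos hb] at hsolve
              have : tail = [] := by injection hsolve with h; exact h.symm
              subst this; simp
            · cases hU2 : pvUnp players (P ++ [c]) with
              | nil => exfalso; rw [hU2] at hb; simp [PySem.Set.ofList] at hb
              | cons p2 o2 =>
                have hb2 : ¬ (PySem.Set.ofList (p2 :: o2)).length ≤ 1 := by rw [← hU2]; exact hb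
                rw [pvUnwind_cons players restricted (P ++ [c]) (S ++ [[]]) p2 o2
                  (by simp) hU2 hb2]
                rw [List.getLast?_concat]
                simp only [Option.getD_some]
                rw [pvTryS_nil_skip]
                rw [pvSolve.eq_def, if_neg hb, hU2] at hsolve
                dsimp only at hsolve
                rw [hsolve]
                dsimp only
                simp
          | none =>
            have hb : ¬ (PySem.Set.ofList (pvUnp players (P ++ [c]))).length ≤ 1 := by
              intro hb
              rw [pvSolve.eq_def, if_pos hb] at hsolve
              exact absurd hsolve (by simp)
            cases hU2 : pvUnp players (P ++ [c]) with
            | nil => exfalso; rw [hU2] at hb; simp [PySem.Set.ofList] at hb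
            | cons p2 o2 =>
              have hb2 : ¬ (PySem.Set.ofList (p2 :: o2)).length ≤ 1 := by rw [← hU2]; exact hb
              rw [pvUnwind_cons players restricted (P ++ [c]) (S ++ [[]]) p2 o2
                (by simp) hU2 hb2]
              rw [List.getLast?_concat]
              simp only [Option.getD_some]
              rw [pvTryS_nil_skip]
              have hsolve2 := hsolve
              rw [pvSolve.eq_def, if_neg hb, hU2] at hsolve2
              dsimp only at hsolve2
              rw [hsolve2]
              dsimp only
              rw [List.getLast?_concat]
              dsimp only
              have hlen2 : ¬ (S ++ [[]]).length ≤ 1 := by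
                simp only [List.length_append, List.length_cons, List.length_nil]; omega
              rw [dif_neg hlen2]
              rw [List.dropLast_concat]
              have hpp : pvPopSkips (S ++ [[]]) c
                  = S.dropLast ++ [S.getLast?.getD [] ++ [c]] := by
                simp [pvPopSkips, List.dropLast_concat]
              rw [hpp]
              have hdecomp : S.dropLast ++ [S.getLast?.getD []] = S := by
                rw [List.getLast?_eq_some_getLast hSne]
                simp only [Option.getD_some]
                exact List.dropLast_concat_getLast hSne
              have hcongr := pvUnwind_top_congr players restricted P S.dropLast
                (S.getLast?.getD [] ++ [c]) (S.getLast?.getD [])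
                (by
                  intro player' opps' hU'
                  rw [hU] at hU'
                  injection hU' with h1 h2
                  subst h1; subst h2
                  have := pvFindPair_some restricted (S.getLast?.getD []) (player :: opps)
                    player List.mem_cons_self opps.reverse hfp
                  rw [← hUP', hsolve] at this
                  dsimp only at this
                  exact this.symm)
              rw [hcongr, hdecomp]
        | none =>
          -- exhausted level: pop or finish
          dsimp only
          have htsnone : pvTryS restricted (S.getLast?.getD []) (player :: opps) player
              List.mem_cons_self opps.reverse = none :=
            pvFindPair_none restricted (S.getLast?.getD []) (player :: opps) player
              List.mem_cons_self opps.reverse hfp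
          cases hP : P.getLast? with
          | none =>
            dsimp only
            rw [pvUnwind_cons players restricted P S player opps hSempty hU hg'']
            rw [htsnone]
            dsimp only
            rw [hP]
          | some last =>
            dsimp only
            obtain ⟨Q, rfl⟩ := List.getLast?_eq_some_iff.mp hP
            have hlast : (Q ++ [last]).getLast? = some last := List.getLast?_concat
            have hQsteps : pvSteps players Q := by
              have := pvSteps_dropLast players (Q ++ [last]) hsteps
              rwa [List.dropLast_concat] at this
            have hQmem := (pvSteps_last_mem players Q last hsteps).1
            have hInv'' : pvInv players Q (pvPopSkips S last) :=
              pvInv_pop players Q last S ⟨hSlen, hsteps, hskips, hiv⟩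
            have hQlen : Q.length + 1 ≤ players.length := by
              have h1 := pvSteps_len players (Q ++ [last]) hsteps
              have h2 : 1 < (PySem.Set.ofList (pvUnp players (Q ++ [last]))).length := by omega
              have h3 : (PySem.Set.ofList (pvUnp players (Q ++ [last]))).length
                  ≤ (pvUnp players (Q ++ [last])).length := PySem.Set.length_ofList_le _
              simp only [List.length_append, List.length_cons, List.length_nil] at h1
              omega
            have hmulast := pvMu_pop players Q last S ⟨hSlen, hsteps, hskips, hiv⟩ hQlen
            have hmuW := pvMu_lt_W players S hskips
              (by
                have h4 := hSlen
                simp only [List.length_append, List.length_cons, List.length_nil] at h4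
                have := pvSteps_len players (Q ++ [last]) hsteps
                simp only [List.length_append, List.length_cons, List.length_nil] at this
                omega)
            have hQn : (pvUnp players Q).length ≤ players.length := by
              have := pvSteps_len players Q hQsteps; omega
            have hfuel'' : (pvW players.length
                  - pvMu (pvB players.length) (players.length + 2) (pvPopSkips S last))
                  * (players.length + 2) + (pvUnp players Q).length + 1 ≤ f := by
              set W := pvW players.length with hW
              set m1 := pvMu (pvB players.length) (players.length + 2) S with hm1
              set m2 := pvMu (pvB players.length) (players.length + 2) (pvPopSkips S last)
                with hm2
              have hstep : W - m2 + 1 ≤ W - m1 := by omega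
              have hmul := Nat.mul_le_mul_right (players.length + 2) hstep
              rw [Nat.add_mul, Nat.one_mul] at hmul
              omega
            have hih := ih Q (pvPopSkips S last) (PySem.Set.update u last) hInv''
              (PySem.Set.nodup_update u last hnd)
              (by
                intro x
                rw [PySem.Set.mem_update u last x]
                have hPQ : pvUnp players (Q ++ [last])
                    = (pvUnp players Q).filter (fun y => !last.contains y) := pvUnp_append _ _ _
                constructor
                · rintro (h1 | h1)
                  · have := (hmem x).mp h1
                    rw [hPQ] at this
                    exact (List.mem_filter.mp this).1
                  · exact hQmem x h1
                · intro h1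
                  by_cases hx : x ∈ last
                  · exact Or.inr hx
                  · left
                    apply (hmem x).mpr
                    rw [hPQ, List.mem_filter]
                    exact ⟨h1, by simp [List.contains_eq_mem, hx]⟩)
              hfuel''
            rw [List.dropLast_concat, hih]
            -- bridge: the old state's unwind pops to exactly this state
            rw [pvUnwind_cons players restricted (Q ++ [last]) S player opps hSempty hU hg'']
            rw [htsnone]
            dsimp only
            rw [hlast]
            dsimp only
            have hl1 : ¬ S.length ≤ 1 := by
              simp only [List.length_append, List.length_cons, List.length_nil] at hSlen
              omega
            rw [dif_neg hl1, List.dropLast_concat]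
    · -- guard fails: both sides keep the pairs found so far
      have hgb : (!S.isEmpty && decide (1 < PySem.Set.len u)) = false := by
        have : ¬ (1 : Int) < (u.length : Int) := by exact_mod_cast hg
        simp [PySem.Set.len, this]
      rw [hgb]
      simp only [Bool.false_eq_true, if_false]
      rw [pvUnwind_le1 _ _ _ _ (by omega)]

theorem pvUnwind_initial (players : List Int) (restricted : List (List Int)) :
    pvUnwind players restricted [] [[]] = make_pairing_alt players restricted := by
  rw [make_pairing_alt]
  by_cases h : (PySem.Set.ofList players).length ≤ 1
  · rw [pvUnwind_le1 _ _ _ _ (by rw [pvUnp_nil]; exact h)]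
    rw [pvSolve.eq_def, if_pos h]
  · cases hPl : players with
    | nil => exfalso; apply h; rw [hPl]; simp [PySem.Set.ofList]
    | cons p o =>
      have hU : pvUnp (p :: o) [] = p :: o := pvUnp_nil _
      rw [hPl] at h
      rw [pvUnwind_cons (p :: o) restricted [] [[]] p o (by simp) hU h]
      rw [pvSolve.eq_def, if_neg h]
      dsimp only
      have hgl : ([[]] : List (List (List Int))).getLast?.getD [] = [] := rfl
      rw [hgl, pvTryS_nil_skip]
      cases htr : pvTry restricted (p :: o) p List.mem_cons_self o.reverse with
      | some tail => dsimp only; simp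
      | none => rfl

-- ===== VERDICT (by name: the statement is the Claim_ definition above) =====
theorem make_pairing_spec : Claim_equal_make_pairing := by
  unfold Claim_equal_make_pairing
  intro players restricted _
  unfold Spec_make_pairing make_pairing
  rw [← pvUnwind_initial players restricted]
  apply pvMain
  · refine ⟨rfl, pvSteps.nil, ?_, ?_⟩
    · intro s hs; simp at hs; subst hs
      exact ⟨List.Pairwise.nil, by intro e he; simp at he⟩
    · intro i hi hi'; simp at hi
  · exact PySem.Set.nodup_ofList players
  · intro x; rw [pvUnp_nil]; exact PySem.Set.mem_ofList (xs := players) (y := x)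
  · rw [pvUnp_nil]
    show _ ≤ pvFuel players.length
    unfold pvFuel pvW pvB pvMu
    simp
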